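-- pv_equiv track=rewrite | github.com/Sun-Yanbo/mt-trna-scripts | 03_statistical_analysis.py | get_paired_positions
-- ===== SOURCE A (Python) =====
-- def get_paired_positions(structure):
--     """Return set of base-paired positions from dot-bracket string."""
--     paired = set()
--     stack  = []
--     for i, c in enumerate(structure):
--         if c == "(":
--             stack.append(i)
--         elif c == ")":
--             if stack:
--                 j = stack.pop()
--                 paired.add(i)
--                 paired.add(j)
--     return paired
-- ===== SOURCE B (Python) =====
-- def _partner(structure, i):
--     """Index of the opening bracket matched with the ')' at i: scan backwards,
--     skipping over complete inner pairs with a balance counter."""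
--     bal = 0
--     for j in range(i - 1, -1, -1):
--         c = structure[j]
--         if c == ")":
--             bal += 1
--         elif c == "(":
--             if bal == 0:
--                 return j
--             bal -= 1
--     return None
--
--
-- def get_paired_positions(structure):
--     """Return set of base-paired positions from dot-bracket string.
--
--     Stackless variant: a left-to-right pass keeps only an int count of the
--     still-open '('; each matched ')' locates its partner by a backward
--     balance scan instead of popping a stack of recorded positions.
--     """
--     paired = set()
--     open_ = 0
--     for i, c in enumerate(structure):
--         if c == "(":
--             open_ += 1
--         elif c == ")":
--             if open_ > 0:
--                 paired.add(i)
--                 paired.add(_partner(structure, i))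
--                 open_ -= 1
--     return paired
-- ===== Notes on version B (the rewrite author's own statement) =====
-- stated objective: alternative
-- what changed: Drops the stack of opening positions: a left-to-right pass keeps only an int count of open '(' and each matched ')' locates its partner by a backward balance scan over the string, so no positions are ever stored.
import Mathlib
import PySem

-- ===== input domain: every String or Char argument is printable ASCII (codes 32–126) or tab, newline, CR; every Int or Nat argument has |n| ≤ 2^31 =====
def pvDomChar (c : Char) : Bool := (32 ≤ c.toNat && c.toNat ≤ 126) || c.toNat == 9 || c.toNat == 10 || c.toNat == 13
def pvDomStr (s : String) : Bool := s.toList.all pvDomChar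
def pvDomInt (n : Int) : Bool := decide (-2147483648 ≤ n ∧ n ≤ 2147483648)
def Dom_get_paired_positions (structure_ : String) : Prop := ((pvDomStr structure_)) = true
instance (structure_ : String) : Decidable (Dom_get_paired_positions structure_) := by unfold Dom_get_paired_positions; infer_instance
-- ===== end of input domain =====

-- B drops A's stack of opening positions: it keeps only an int count of open '(' and
-- finds each matched close's partner by a backward balance scan (objective: alternative).

-- ===== PORT A =====
-- loop body of A's for-loop, state = (paired, stack); 'stack.pop()' = last element + dropLast
def pvStepA (st : PySem.Set Int × List Int) (ic : Int × Char) : PySem.Set Int × List Int :=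
  if ic.2 = '(' then (st.1, st.2 ++ [ic.1])
  else if ic.2 = ')' then
    if h : st.2 = [] then st
    else (PySem.Set.add (PySem.Set.add st.1 ic.1) (st.2.getLast h), st.2.dropLast)
  else st

def get_paired_positions (structure_ : String) : List Int :=
  ((PySem.List.enumerate structure_.toList).foldl pvStepA (PySem.Set.empty, [])).1

-- ===== PORT B =====
-- Source B's _partner inner loop: walks the enumerated prefix before i in reverse
-- ('for j in range(i-1,-1,-1)'), keeping the balance counter (never negative in Python,
-- so Nat is exact); returns none where Python returns None.
def pvBscan (l : List (Int × Char)) (bal : Nat) : Option Int :=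
  match l with
  | [] => none
  | (j, c) :: rest =>
    if c = ')' then pvBscan rest (bal + 1)
    else if c = '(' then
      if bal = 0 then some j else pvBscan rest (bal - 1)
    else pvBscan rest bal

-- Source B's _partner(structure, i)
def pvPartner (s : List Char) (i : Int) : Option Int :=
  pvBscan (((PySem.List.enumerate s).take i.toNat).reverse) 0

-- loop body of B's for-loop, state = (paired, open_); Python adds the int _partner
-- returns — under the guard open_ > 0 it is never None (proved below), so '.getD 0' never
-- supplies its default
def pvStepB (s : List Char) (st : PySem.Set Int × Int) (ic : Int × Char) : PySem.Set Int × Int :=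
  if ic.2 = '(' then (st.1, st.2 + 1)
  else if ic.2 = ')' then
    if 0 < st.2 then
      (PySem.Set.add (PySem.Set.add st.1 ic.1) ((pvPartner s ic.1).getD 0), st.2 - 1)
    else st
  else st

def get_paired_positions_alt (structure_ : String) : List Int :=
  ((PySem.List.enumerate structure_.toList).foldl (pvStepB structure_.toList)
    (PySem.Set.empty, 0)).1

-- ===== PRECONDITION & SPEC =====
def Spec_get_paired_positions (structure_ : String) (out : List Int) : Prop := out = get_paired_positions_alt structure_
instance (structure_ : String) (out : List Int) : Decidable (Spec_get_paired_positions structure_ out) := by unfold Spec_get_paired_positions; infer_instance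

-- ===== CLAIM (what is proved, stated in full; the proofs are below) =====
def Claim_equal_get_paired_positions : Prop := ∀ (structure_ : String), Dom_get_paired_positions structure_ → Spec_get_paired_positions structure_ (get_paired_positions structure_)

-- ===== LEMMAS AND PROOFS =====

-- the stack component of A's fold, as a standalone fold ('pop' on [] is dropLast [] = [])
def pvStk (l : List (Int × Char)) : List Int :=
  l.foldl (fun st ic => if ic.2 = '(' then st ++ [ic.1]
                        else if ic.2 = ')' then st.dropLast else st) []

lemma pvStepA_snd (l : List (Int × Char)) (P : PySem.Set Int) (s0 : List Int) :
    (l.foldl pvStepA (P, s0)).2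
      = l.foldl (fun st ic => if ic.2 = '(' then st ++ [ic.1]
                              else if ic.2 = ')' then st.dropLast else st) s0 := by
  induction l generalizing P s0 with
  | nil => rfl
  | cons ic l ih =>
    simp only [List.foldl_cons]
    by_cases h1 : ic.2 = '('
    · simp only [pvStepA, h1, if_pos]; exact ih _ _
    · by_cases h2 : ic.2 = ')'
      · by_cases h3 : s0 = []
        · subst h3
          simp only [pvStepA, h2, if_pos, dif_pos, List.dropLast_nil]
          simpa using ih P []
        · simp only [pvStepA, h2, if_pos, dif_neg h3]
          exact ih _ _
      · simp only [pvStepA, h1, h2]; exact ih _ _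

-- the backward scan over l.reverse with balance bal reads the (bal+1)-th-from-top
-- element of the stack A would hold after processing l
lemma pvDropRev {T : Type} (xs : List T) (n : Nat) :
    xs.dropLast.reverse[n]? = xs.reverse[n + 1]? := by
  rcases xs.eq_nil_or_concat with rfl | ⟨ys, a, rfl⟩
  · simp
  · simp

lemma pvBscan_eq (l : List (Int × Char)) (bal : Nat) :
    pvBscan l.reverse bal = (pvStk l).reverse[bal]? := by
  induction l using List.reverseRecOn generalizing bal with
  | nil => simp [pvBscan, pvStk]
  | append_singleton l ic ih =>
    obtain ⟨j, c⟩ := ic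
    rw [List.reverse_append, List.reverse_singleton, List.singleton_append]
    by_cases h1 : c = '('
    · subst h1
      have hstk : pvStk (l ++ [(j, '(')]) = pvStk l ++ [j] := by
        simp [pvStk, List.foldl_append]
      rw [hstk, List.reverse_append, List.reverse_singleton, List.singleton_append]
      by_cases hb : bal = 0
      · subst hb; simp [pvBscan]
      · rcases Nat.exists_eq_succ_of_ne_zero hb with ⟨m, rfl⟩
        simp only [pvBscan, reduceIte, Nat.add_one_sub_one, List.getElem?_cons_succ,
          Nat.succ_ne_zero]
        exact ih m
    · by_cases h2 : c = ')'
      · subst h2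
        have hstk : pvStk (l ++ [(j, ')')]) = (pvStk l).dropLast := by
          simp [pvStk, List.foldl_append]
        rw [hstk]
        simp only [pvBscan, reduceIte]
        rw [ih, pvDropRev]
      · have hstk : pvStk (l ++ [(j, c)]) = pvStk l := by
          simp [pvStk, List.foldl_append, h1, h2]
        rw [hstk]
        simp only [pvBscan, h1, h2]
        exact ih bal

-- main invariant: after any prefix, A's paired set equals B's and A's stack height is
-- B's open counter
lemma pvMain (s : List Char) (n : Nat) :
    ((((PySem.List.enumerate s).take n).foldl pvStepA (PySem.Set.empty, [])).1
        = (((PySem.List.enumerate s).take n).foldl (pvStepB s) (PySem.Set.empty, 0)).1)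
    ∧ ((((PySem.List.enumerate s).take n).foldl (pvStepB s) (PySem.Set.empty, 0)).2
        = ((((PySem.List.enumerate s).take n).foldl pvStepA (PySem.Set.empty, [])).2.length : Int)) := by
  induction n with
  | zero => simp
  | succ n ih =>
    rcases lt_or_ge n (PySem.List.enumerate s).length with hn | hn
    · obtain ⟨ih1, ih2⟩ := ih
      rw [List.take_succ, List.getElem?_eq_getElem hn]
      have helem : (PySem.List.enumerate s)[n] = ((n : Int), s[n]'(by
          simpa [PySem.List.length_enumerate] using hn)) := by
        simpa using PySem.List.getElem_enumerate (xs := s) (s := 0) (k := n) hn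
      simp only [Option.toList, List.foldl_append, List.foldl_cons, List.foldl_nil]
      set aSt := ((PySem.List.enumerate s).take n).foldl pvStepA (PySem.Set.empty, [])
        with haSt
      set bSt := ((PySem.List.enumerate s).take n).foldl (pvStepB s) (PySem.Set.empty, 0)
        with hbSt
      rw [helem]
      set ch := s[n]'(by simpa [PySem.List.length_enumerate] using hn) with hch
      by_cases h1 : ch = '('
      · simp only [pvStepA, pvStepB, h1, if_pos]
        exact ⟨ih1, by simp [ih2]⟩
      · by_cases h2 : ch = ')'
        · by_cases h3 : aSt.2 = []
          · have hb0 : ¬ (0 < bSt.2) := by rw [ih2, h3]; simp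
            simp only [pvStepA, pvStepB, h2, if_pos, dif_pos h3, hb0, if_false]
            exact ⟨ih1, ih2⟩
          · have hbpos : 0 < bSt.2 := by
              rw [ih2]
              exact_mod_cast List.length_pos_iff.mpr h3
            have hpart : (pvPartner s ((n : Int))).getD 0 = aSt.2.getLast h3 := by
              have hstk : pvStk ((PySem.List.enumerate s).take n) = aSt.2 := by
                rw [haSt, pvStepA_snd]; rfl
              have hbs := pvBscan_eq ((PySem.List.enumerate s).take n) 0
              rw [hstk] at hbs
              have hrev : aSt.2.reverse[0]? = some (aSt.2.getLast h3) := by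
                rcases hr : aSt.2.reverse with _ | ⟨x, xs⟩
                · exact absurd (by simpa using hr) h3
                · have hx : aSt.2.getLast h3 = x := by
                    simp [List.getLast_eq_head_reverse, hr]
                  simp [hx]
              unfold pvPartner
              rw [Int.toNat_natCast, hbs, hrev]
              rfl
            refine ⟨?_, ?_⟩
            · simp [pvStepA, pvStepB, h2, h3, hbpos, ih1, hpart]
            · simp only [pvStepA, pvStepB, h2, if_pos, dif_neg h3, if_pos hbpos]
              rw [ih2]
              have hlen : aSt.2.length = aSt.2.dropLast.length + 1 := by
                rcases hc : aSt.2 with _ | ⟨x, xs⟩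
                · exact absurd hc h3
                · simp
              rw [hlen]; push_cast; ring
        · simp only [pvStepA, pvStepB, h1, h2]
          exact ⟨ih1, ih2⟩
    · rw [List.take_succ, List.getElem?_eq_none hn]
      simpa using ⟨ih.1, ih.2⟩

-- ===== VERDICT (by name: the statement is the Claim_ definition above) =====
theorem get_paired_positions_spec : Claim_equal_get_paired_positions := by
  intro s _
  unfold Spec_get_paired_positions get_paired_positions get_paired_positions_alt
  have h := (pvMain s.toList (PySem.List.enumerate s.toList).length).1
  rw [List.take_length] at h
  exact h
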